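-- pv_equiv track=rewrite | github.com/algoslearner/leetcode | grokking/coding/03_Top_K_elements/10_sum_of_elements.py | find_sum_of_elements
-- ===== SOURCE A (Python) =====
-- def find_sum_of_elements(nums, k1, k2):
--   nums.sort()
--   if len(nums) < k1 or len(nums) < k2:
--     return 0
--
--   sumSub = 0
--   for i in range(len(nums)):
--     if i+1 > k1 and i+1 < k2:
--       sumSub += nums[i]
--   return sumSub
-- ===== SOURCE B (Python) =====
-- def sum_smallest(xs, m):
--     # sum of the m smallest elements of xs (quickselect-style partitioning, no full sort)
--     if m <= 0:
--         return 0
--     if len(xs) <= m: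
--         return sum(xs)
--     pivot = xs[len(xs) // 2]
--     lt = [x for x in xs if x < pivot]
--     gt = [x for x in xs if x > pivot]
--     ne = len(xs) - len(lt) - len(gt)
--     if m <= len(lt):
--         return sum_smallest(lt, m)
--     if m <= len(lt) + ne:
--         return sum(lt) + pivot * (m - len(lt))
--     return sum(lt) + pivot * ne + sum_smallest(gt, m - len(lt) - ne)
--
--
-- def find_sum_of_elements(nums, k1, k2):
--     n = len(nums)
--     if n < k1 or n < k2:
--         return 0
--     lo = max(k1, 0)
--     hi = max(k2 - 1, 0)
--     if hi <= lo:
--         return 0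
--     return sum_smallest(nums, hi) - sum_smallest(nums, lo)
-- ===== Notes on version B (the rewrite author's own statement) =====
-- stated objective: alternative
-- what changed: B replaces sort-then-scan with a quickselect-style recursive three-way partition computing the sum of the m smallest elements directly, taking the band sum as a difference of two prefix sums; A's in-place sort of nums is not performed by B (return values only).
import Mathlib
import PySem

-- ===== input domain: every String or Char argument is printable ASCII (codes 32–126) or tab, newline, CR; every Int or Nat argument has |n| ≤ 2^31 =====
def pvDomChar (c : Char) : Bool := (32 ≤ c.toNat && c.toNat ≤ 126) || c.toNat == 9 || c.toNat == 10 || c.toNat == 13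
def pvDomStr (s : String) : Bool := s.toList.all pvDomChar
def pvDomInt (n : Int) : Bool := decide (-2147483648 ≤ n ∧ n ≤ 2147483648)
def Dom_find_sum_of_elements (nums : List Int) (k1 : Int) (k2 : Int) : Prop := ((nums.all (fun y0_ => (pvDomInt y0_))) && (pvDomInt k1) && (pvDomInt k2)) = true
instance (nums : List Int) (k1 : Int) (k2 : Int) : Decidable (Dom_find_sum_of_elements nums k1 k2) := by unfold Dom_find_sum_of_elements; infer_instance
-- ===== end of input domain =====

-- B replaces A's sort-then-scan by a quickselect-style recursive three-way partition (difference of two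
-- prefix sums of the sorted order); equivalence is about the RETURN value only — A sorts nums in place, B does not mutate it.

-- ===== PORT A =====
def find_sum_of_elements (nums : List Int) (k1 : Int) (k2 : Int) : Int :=
  let s := PySem.List.sorted nums (fun x => x) false
  if ((s.length : Int) < k1 ∨ (s.length : Int) < k2) then 0
  else
    (PySem.List.pyRange 0 (s.length : Int) 1).foldl
      (fun sumSub i => if (i + 1 > k1 ∧ i + 1 < k2) then sumSub + PySem.List.pyGetD s i 0 else sumSub) 0

-- ===== PORT B =====
-- pv_pivot_mem is cited by the port's decreasing_by proof
theorem pv_pivot_mem (xs : List Int) (h : xs ≠ []) :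
    PySem.List.pyGetD xs (PySem.Int.floordiv (xs.length : Int) 2) 0 ∈ xs := by
  have hl : 0 < xs.length := List.length_pos_iff.mpr h
  rw [PySem.Int.floordiv_eq_ediv_of_pos (by norm_num)]
  rw [PySem.List.pyGetD_eq_getElem xs 0 (by positivity) (by omega)]
  exact List.getElem_mem _

def sumSmallest (xs : List Int) (m : Int) : Int :=
  if m ≤ 0 then 0
  else if h2 : (xs.length : Int) ≤ m then xs.sum
  else
    let pivot := PySem.List.pyGetD xs (PySem.Int.floordiv (xs.length : Int) 2) 0
    let lt := xs.filter (fun x => decide (x < pivot))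
    let gt := xs.filter (fun x => decide (pivot < x))
    let ne := (xs.length : Int) - (lt.length : Int) - (gt.length : Int)
    if m ≤ (lt.length : Int) then sumSmallest lt m
    else if m ≤ (lt.length : Int) + ne then lt.sum + pivot * (m - (lt.length : Int))
    else lt.sum + pivot * ne + sumSmallest gt (m - (lt.length : Int) - ne)
termination_by xs.length
decreasing_by
  all_goals
    have hpm : PySem.List.pyGetD xs (PySem.Int.floordiv (xs.length : Int) 2) 0 ∈ xs :=
      pv_pivot_mem xs (by intro hn; simp [hn] at h2; omega)
    simp only [List.length_unattach]
    refine lt_of_lt_of_le (List.length_filter_lt_length_iff_exists.mpr ⟨⟨_, hpm⟩, List.mem_attach _ _, by simp⟩) ?_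
    simp

def find_sum_of_elements_alt (nums : List Int) (k1 : Int) (k2 : Int) : Int :=
  let n : Int := (nums.length : Int)
  if (n < k1 ∨ n < k2) then 0
  else
    let lo := max k1 0
    let hi := max (k2 - 1) 0
    if hi ≤ lo then 0
    else sumSmallest nums hi - sumSmallest nums lo

-- ===== PRECONDITION & SPEC =====
def Spec_find_sum_of_elements (nums : List Int) (k1 : Int) (k2 : Int) (out : Int) : Prop := out = find_sum_of_elements_alt nums k1 k2
instance (nums : List Int) (k1 : Int) (k2 : Int) (out : Int) : Decidable (Spec_find_sum_of_elements nums k1 k2 out) := by unfold Spec_find_sum_of_elements; infer_instance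

-- ===== CLAIM (what is proved, stated in full; the proofs are below) =====
def Claim_equal_find_sum_of_elements : Prop := ∀ (nums : List Int) (k1 : Int) (k2 : Int), Dom_find_sum_of_elements nums k1 k2 → Spec_find_sum_of_elements nums k1 k2 (find_sum_of_elements nums k1 k2)

-- ===== LEMMAS AND PROOFS =====

theorem pv_filter_lt_of_mem {xs : List Int} {p : Int → Bool} {y : Int} (hy : y ∈ xs)
    (hpy : p y = false) : (xs.filter p).length < xs.length :=
  List.length_filter_lt_length_iff_exists.mpr ⟨y, hy, by simp [hpy]⟩

theorem pv_sum_take_succ (t : List Int) (n : Nat) (h : n < t.length) :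
    (t.take (n + 1)).sum = (t.take n).sum + t.getD n 0 := by
  have h' : t[n]? = some t[n] := List.getElem?_eq_getElem h
  rw [List.take_add_one, h', List.sum_append]
  simp [List.getD_eq_getElem?_getD, h']

theorem pv_bandSum (t : List Int) (lo hi : Nat) (h1 : lo ≤ hi) (h2 : hi ≤ t.length) (n : Nat) :
    (List.range n).foldl (fun acc k => if lo ≤ k ∧ k < hi then acc + t.getD k 0 else acc) 0
      = (t.take (min hi n)).sum - (t.take (min lo n)).sum := by
  induction n with
  | zero => simp
  | succ n ih =>
    rw [List.range_succ, List.foldl_append, ih]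
    simp only [List.foldl_cons, List.foldl_nil]
    by_cases hc : lo ≤ n ∧ n < hi
    · rw [if_pos hc]
      have e1 : min lo (n + 1) = min lo n := by omega
      have e2 : min hi (n + 1) = n + 1 := by omega
      have e3 : min hi n = n := by omega
      rw [e1, e2, e3, pv_sum_take_succ t n (by omega)]
      ring
    · rw [if_neg hc]
      rcases (by omega : n < lo ∨ hi ≤ n) with hlt | hge
      · have e1 : min lo (n + 1) = n + 1 := by omega
        have e2 : min lo n = n := by omega
        have e3 : min hi (n + 1) = n + 1 := by omega
        have e4 : min hi n = n := by omega
        rw [e1, e2, e3, e4]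
        ring
      · have e1 : min lo (n + 1) = min lo n := by omega
        have e2 : min hi (n + 1) = min hi n := by omega
        rw [e1, e2]

theorem pv_sorted_decomp (xs : List Int) (pivot : Int) :
    PySem.List.sorted xs (fun x => x) false
      = PySem.List.sorted (xs.filter (fun x => decide (x < pivot))) (fun x => x) false
        ++ (List.replicate (xs.length - (xs.filter (fun x => decide (x < pivot))).length
              - (xs.filter (fun x => decide (pivot < x))).length) pivot
            ++ PySem.List.sorted (xs.filter (fun x => decide (pivot < x))) (fun x => x) false) := by
  set lt := xs.filter (fun x => decide (x < pivot)) with hlt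
  set gt := xs.filter (fun x => decide (pivot < x)) with hgt
  set eqs := xs.filter (fun x => decide (x = pivot)) with heqs
  have hrest1 : (xs.filter (fun x => !decide (x < pivot))).filter (fun x => decide (x = pivot)) = eqs := by
    rw [List.filter_filter]
    apply List.filter_congr
    intro x _
    by_cases h : x = pivot <;> simp [h]
  have hrest2 : (xs.filter (fun x => !decide (x < pivot))).filter (fun x => !decide (x = pivot)) = gt := by
    rw [List.filter_filter]
    apply List.filter_congr
    intro x _
    rcases lt_trichotomy x pivot with h | h | h
    · simp [h, h.ne, asymm h]
    · simp [h]
    · simp [h, h.ne', asymm h]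
  have hperm : (lt ++ (eqs ++ gt)).Perm xs := by
    have p1 := List.filter_append_perm (fun x => decide (x < pivot)) xs
    have p2 := List.filter_append_perm (fun x => decide (x = pivot))
        (xs.filter (fun x => !decide (x < pivot)))
    rw [hrest1, hrest2] at p2
    exact ((p2.append_left lt).trans p1)
  have heqrep : eqs = List.replicate eqs.length pivot := by
    apply List.eq_replicate_of_mem
    intro b hb
    simpa using List.of_mem_filter hb
  have hlen : lt.length + eqs.length + gt.length = xs.length := by
    have := hperm.length_eq
    simp only [List.length_append] at this
    omega
  have hle : lt.length ≤ xs.length := List.length_filter_le _ _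
  have hcount : xs.length - lt.length - gt.length = eqs.length := by omega
  rw [hcount]
  apply PySem.List.eq_of_perm_of_pairwise_le_of_injective (fun x => x) (fun a b h => h)
  · -- permutation
    refine (PySem.List.sorted_perm xs (fun x => x) false).trans (hperm.symm.trans ?_)
    refine List.Perm.append (PySem.List.sorted_perm lt (fun x => x) false).symm ?_
    refine List.Perm.append ?_ (PySem.List.sorted_perm gt (fun x => x) false).symm
    rw [← heqrep]
  · exact PySem.List.sorted_pairwise xs (fun x => x)
  · -- RHS is pairwise ≤
    have hltmem : ∀ x ∈ PySem.List.sorted lt (fun x => x) false, x < pivot := by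
      intro x hx
      have : x ∈ lt := (PySem.List.sorted_perm lt (fun x => x) false).mem_iff.mp hx
      simpa using List.of_mem_filter this
    have hgtmem : ∀ x ∈ PySem.List.sorted gt (fun x => x) false, pivot < x := by
      intro x hx
      have : x ∈ gt := (PySem.List.sorted_perm gt (fun x => x) false).mem_iff.mp hx
      simpa using List.of_mem_filter this
    rw [List.pairwise_append]
    refine ⟨PySem.List.sorted_pairwise lt (fun x => x), ?_, ?_⟩
    · rw [List.pairwise_append]
      refine ⟨List.pairwise_replicate.mpr (Or.inr le_rfl), PySem.List.sorted_pairwise gt (fun x => x), ?_⟩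
      intro a ha b hb
      have := List.eq_of_mem_replicate ha
      exact le_of_lt (this ▸ hgtmem b hb)
    · intro a ha b hb
      have halt := hltmem a ha
      rcases List.mem_append.mp hb with hb | hb
      · have := List.eq_of_mem_replicate hb
        exact le_of_lt (this ▸ halt)
      · exact le_of_lt (halt.trans (hgtmem b hb))

theorem pv_sumSmallest_eq (xs : List Int) (m : Int) :
    sumSmallest xs m = ((PySem.List.sorted xs (fun x => x) false).take m.toNat).sum := by
  suffices H : ∀ (N : Nat) (xs : List Int) (m : Int), xs.length ≤ N →
      sumSmallest xs m = ((PySem.List.sorted xs (fun x => x) false).take m.toNat).sum from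
    H xs.length xs m le_rfl
  intro N
  induction N with
  | zero =>
    intro xs m h
    have hx : xs = [] := List.length_eq_zero_iff.mp (by omega)
    subst hx
    rw [sumSmallest]
    have hnil : PySem.List.sorted ([] : List Int) (fun x => x) false = [] := rfl
    rw [hnil]
    split_ifs <;> simp_all <;> omega
  | succ N ih =>
    intro xs m hN
    rw [sumSmallest]
    by_cases hm : m ≤ 0
    · rw [if_pos hm]
      have h0 : m.toNat = 0 := by omega
      simp [h0]
    · rw [if_neg hm]
      by_cases hlen : (xs.length : Int) ≤ m
      · rw [dif_pos hlen]
        have hsl := (PySem.List.sorted_perm xs (fun x => x) false).length_eq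
        rw [List.take_of_length_le (by omega)]
        exact ((PySem.List.sorted_perm xs (fun x => x) false).sum_eq).symm
      · rw [dif_neg hlen]
        dsimp only
        set pivot := PySem.List.pyGetD xs (PySem.Int.floordiv (xs.length : Int) 2) 0 with hpiv
        set lt := xs.filter (fun x => decide (x < pivot)) with hltdef
        set gt := xs.filter (fun x => decide (pivot < x)) with hgtdef
        have hpm : pivot ∈ xs := pv_pivot_mem xs (by intro hn; rw [hn] at hlen; simp at hlen; omega)
        have hltlt : lt.length < xs.length := pv_filter_lt_of_mem hpm (by simp)
        have hgtlt : gt.length < xs.length := pv_filter_lt_of_mem hpm (by simp)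
        have hdec := pv_sorted_decomp xs pivot
        rw [← hltdef, ← hgtdef] at hdec
        have hsltlen : (PySem.List.sorted lt (fun x => x) false).length = lt.length :=
          (PySem.List.sorted_perm lt (fun x => x) false).length_eq
        have hsltsum : (PySem.List.sorted lt (fun x => x) false).sum = lt.sum :=
          (PySem.List.sorted_perm lt (fun x => x) false).sum_eq
        have hslen := (PySem.List.sorted_perm xs (fun x => x) false).length_eq
        have hltgt : lt.length + gt.length ≤ xs.length := by
          have := congrArg List.length hdec
          simp only [List.length_append, List.length_replicate, hsltlen, hslen,
            (PySem.List.sorted_perm gt (fun x => x) false).length_eq] at this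
          omega
        by_cases c1 : m ≤ (lt.length : Int)
        · rw [if_pos c1, hdec, List.take_append_of_le_length (by omega)]
          exact ih lt m (by omega)
        · rw [if_neg c1]
          by_cases c2 : m ≤ (lt.length : Int) + ((xs.length : Int) - (lt.length : Int) - (gt.length : Int))
          · rw [if_pos c2, hdec, List.take_append, List.take_of_length_le (by omega),
              List.take_append_of_le_length (by simp only [List.length_replicate]; omega),
              List.take_replicate, List.sum_append, List.sum_replicate, hsltsum, hsltlen]
            have hmin : min (m.toNat - lt.length) (xs.length - lt.length - gt.length)
                = m.toNat - lt.length := by omega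
            rw [hmin, nsmul_eq_mul]
            have hcast : ((m.toNat - lt.length : Nat) : Int) = m - (lt.length : Int) := by omega
            rw [hcast]
            ring
          · rw [if_neg c2, hdec, List.take_append, List.take_of_length_le (by omega),
              List.take_append, List.take_of_length_le (by simp only [List.length_replicate]; omega),
              List.sum_append, List.sum_append, List.sum_replicate, hsltsum, hsltlen,
              List.length_replicate]
            rw [ih gt (m - (lt.length : Int) - ((xs.length : Int) - (lt.length : Int) - (gt.length : Int))) (by omega)]
            have harg : (m - (lt.length : Int) - ((xs.length : Int) - (lt.length : Int) - (gt.length : Int))).toNat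
                = m.toNat - lt.length - (xs.length - lt.length - gt.length) := by omega
            rw [harg, nsmul_eq_mul]
            have hcast : ((xs.length - lt.length - gt.length : Nat) : Int)
                = (xs.length : Int) - (lt.length : Int) - (gt.length : Int) := by omega
            rw [hcast]
            ring

-- ===== VERDICT (by name: the statement is the Claim_ definition above) =====
theorem pv_A_band (s : List Int) (k1 k2 : Int) (hk2 : k2 ≤ (s.length : Int)) :
    (PySem.List.pyRange 0 (s.length : Int) 1).foldl
        (fun sumSub i => if (i + 1 > k1 ∧ i + 1 < k2) then sumSub + PySem.List.pyGetD s i 0 else sumSub) 0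
      = (s.take ((k2 - 1).toNat)).sum - (s.take k1.toNat).sum ∧ (max k1 0 : Int) < max (k2 - 1) 0
      ∨ ((max (k2 - 1) 0 : Int) ≤ max k1 0
          ∧ (PySem.List.pyRange 0 (s.length : Int) 1).foldl
              (fun sumSub i => if (i + 1 > k1 ∧ i + 1 < k2) then sumSub + PySem.List.pyGetD s i 0 else sumSub) 0 = 0) := by
  rw [PySem.List.pyRange_zero_nat, List.foldl_map]
  by_cases hband : (max k1 0 : Int) < max (k2 - 1) 0
  · refine Or.inl ⟨?_, hband⟩
    rw [PySem.List.foldl_congr_mem (List.range s.length) _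
        (fun acc k => if k1.toNat ≤ k ∧ k < (k2 - 1).toNat then acc + s.getD k 0 else acc) 0
        (by intro acc k _
            rw [PySem.List.pyGetD_natCast]
            exact if_congr (by omega) rfl rfl),
      pv_bandSum s k1.toNat ((k2 - 1).toNat) (by omega) (by omega) s.length]
    have e1 : min ((k2 - 1).toNat) s.length = (k2 - 1).toNat := by omega
    have e2 : min k1.toNat s.length = k1.toNat := by omega
    rw [e1, e2]
  · right
    refine ⟨by omega, ?_⟩
    rw [PySem.List.foldl_congr_mem (List.range s.length) _ (fun acc _ => acc) 0
        (by intro acc k _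
            rw [if_neg (by omega)]),
      PySem.List.foldl_ignore]

-- ===== VERDICT (by name: the statement is the Claim_ definition above) =====
theorem find_sum_of_elements_spec : Claim_equal_find_sum_of_elements := by
  intro nums k1 k2 _dom
  unfold Spec_find_sum_of_elements
  unfold find_sum_of_elements find_sum_of_elements_alt
  dsimp only
  have hslen : (PySem.List.sorted nums (fun x => x) false).length = nums.length :=
    (PySem.List.sorted_perm nums (fun x => x) false).length_eq
  rw [hslen]
  by_cases hg : ((nums.length : Int) < k1 ∨ (nums.length : Int) < k2)
  · rw [if_pos hg, if_pos hg]
  · rw [if_neg hg, if_neg hg]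
    have hk2 : k2 ≤ ((PySem.List.sorted nums (fun x => x) false).length : Int) := by
      rw [hslen]; omega
    rcases pv_A_band (PySem.List.sorted nums (fun x => x) false) k1 k2 hk2 with ⟨hband, hlt⟩ | ⟨hle, hband⟩
    · rw [hslen] at hband
      rw [hband, if_neg (by omega), pv_sumSmallest_eq, pv_sumSmallest_eq]
      have e1 : (max (k2 - 1) 0).toNat = (k2 - 1).toNat := by omega
      have e2 : (max k1 0).toNat = k1.toNat := by omega
      rw [e1, e2]
    · rw [hslen] at hband
      rw [hband, if_pos hle]
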